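-- pv_equiv track=rewrite | github.com/lekdel21/INF8775 | swap.py | get_enclosure_coords
-- ===== SOURCE A (Python) =====
-- def get_enclosure_coords(size, start_point):
--     enclosure_coords = []
--     x, y = start_point
--     dx_max = 5
--     dy_max = 4
--     count = 0
--     for j in range(dy_max):
--         for i in range(dx_max):
--             count += 1
--             if (count) > size:
--                 break
--             enclosure_coords.append((x+i,y+j))
--
--     return enclosure_coords
-- ===== SOURCE B (Python) =====
-- def get_enclosure_coords(size, start_point):
--     x, y = start_point
--
--     def rows(j, remaining):
--         if j >= 4 or remaining <= 0:
--             return []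
--         n = min(remaining, 5)
--         return [(x + i, y + j) for i in range(n)] + rows(j + 1, remaining - 5)
--
--     return rows(0, size)
-- ===== Notes on version B (the rewrite author's own statement) =====
-- stated objective: alternative
-- what changed: Replaces the counter-and-break double loop by a recursion over rows with a remaining-budget argument: each row contributes min(remaining,5) cells computed directly, no counter and no break.
import Mathlib
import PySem

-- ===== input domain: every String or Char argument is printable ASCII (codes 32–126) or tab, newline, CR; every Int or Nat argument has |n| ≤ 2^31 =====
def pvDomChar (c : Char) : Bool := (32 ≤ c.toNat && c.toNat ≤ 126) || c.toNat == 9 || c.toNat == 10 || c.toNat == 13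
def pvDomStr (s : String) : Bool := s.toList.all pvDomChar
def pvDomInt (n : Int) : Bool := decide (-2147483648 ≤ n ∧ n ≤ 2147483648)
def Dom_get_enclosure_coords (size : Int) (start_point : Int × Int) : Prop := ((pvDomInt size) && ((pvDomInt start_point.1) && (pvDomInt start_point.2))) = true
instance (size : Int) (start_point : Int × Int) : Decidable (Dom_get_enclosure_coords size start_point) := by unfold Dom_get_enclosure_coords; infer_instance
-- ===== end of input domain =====

-- B replaces the counter-and-break double loop by a recursion over rows with a
-- remaining-budget argument; each row contributes min(remaining,5) cells directly
-- (objective: alternative decomposition, same behaviour).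

-- ===== PORT A =====
-- inner `for i in range(dx_max)` loop; `break` ends the recursion, state = (count, acc)
def pvInnerA (size x y j : Int) : List Int → Int × List (Int × Int) → Int × List (Int × Int)
  | [], st => st
  | i :: is, (count, acc) =>
    let count := count + 1
    if count > size then (count, acc)
    else pvInnerA size x y j is (count, acc ++ [(x + i, y + j)])

def get_enclosure_coords (size : Int) (start_point : Int × Int) : List (Int × Int) :=
  ((PySem.List.pyRange 0 4 1).foldl
    (fun st j => pvInnerA size start_point.1 start_point.2 j (PySem.List.pyRange 0 5 1) st)
    (0, [])).2

-- ===== PORT B =====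
-- recursive `rows(j, remaining)` helper from Source B
def pvRowsB (x y j remaining : Int) : List (Int × Int) :=
  if j ≥ 4 ∨ remaining ≤ 0 then []
  else
    ((PySem.List.pyRange 0 (min remaining 5) 1).map (fun i => (x + i, y + j)))
      ++ pvRowsB x y (j + 1) (remaining - 5)
termination_by (4 - j).toNat
decreasing_by simp_all

def get_enclosure_coords_alt (size : Int) (start_point : Int × Int) : List (Int × Int) :=
  pvRowsB start_point.1 start_point.2 0 size

-- ===== PRECONDITION & SPEC =====
def Spec_get_enclosure_coords (size : Int) (start_point : Int × Int) (out : List (Int × Int)) : Prop := out = get_enclosure_coords_alt size start_point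
instance (size : Int) (start_point : Int × Int) (out : List (Int × Int)) : Decidable (Spec_get_enclosure_coords size start_point out) := by unfold Spec_get_enclosure_coords; infer_instance

-- ===== CLAIM (what is proved, stated in full; the proofs are below) =====
def Claim_equal_get_enclosure_coords : Prop := ∀ (size : Int) (start_point : Int × Int), Dom_get_enclosure_coords size start_point → Spec_get_enclosure_coords size start_point (get_enclosure_coords size start_point)

-- ===== LEMMAS AND PROOFS =====

-- ===== VERDICT (by name: the statement is the Claim_ definition above) =====
theorem get_enclosure_coords_spec : Claim_equal_get_enclosure_coords := by
  intro size sp _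
  unfold Spec_get_enclosure_coords get_enclosure_coords get_enclosure_coords_alt
  rcases sp with ⟨x, y⟩
  by_cases h0 : size ≤ 0
  · rw [pvRowsB.eq_def]
    simp [pvInnerA, show PySem.List.pyRange 0 4 1 = [0,1,2,3] from by decide,
      show PySem.List.pyRange 0 5 1 = [0,1,2,3,4] from by decide, show size ≤ (0:Int) from by omega, show size ≤ (1:Int) from by omega, show size ≤ (2:Int) from by omega, show size ≤ (3:Int) from by omega]
  by_cases h20 : 20 ≤ size
  · rw [pvRowsB.eq_def]; rw [pvRowsB.eq_def]; rw [pvRowsB.eq_def]; rw [pvRowsB.eq_def]; rw [pvRowsB.eq_def]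
    norm_num [pvInnerA, show PySem.List.pyRange 0 4 1 = [0,1,2,3] from by decide,
      show PySem.List.pyRange 0 5 1 = [0,1,2,3,4] from by decide,
      show min size 5 = 5 from by omega, show min (size - 5) 5 = 5 from by omega,
      show min (size - 5 - 5) 5 = 5 from by omega, show min (size - 5 - 5 - 5) 5 = 5 from by omega,
      show ¬(size ≤ (0:Int)) from by omega, show ¬(size - 5 ≤ (0:Int)) from by omega,
      show ¬(size - 5 - 5 ≤ (0:Int)) from by omega, show ¬(size - 5 - 5 - 5 ≤ (0:Int)) from by omega, show ¬(size ≤ (0:Int)) from by omega, show ¬(size ≤ (1:Int)) from by omega, show ¬(size ≤ (2:Int)) from by omega, show ¬(size ≤ (3:Int)) from by omega, show ¬(size ≤ (4:Int)) from by omega, show ¬(size ≤ (5:Int)) from by omega, show ¬(size ≤ (6:Int)) from by omega, show ¬(size ≤ (7:Int)) from by omega, show ¬(size ≤ (8:Int)) from by omega, show ¬(size ≤ (9:Int)) from by omega, show ¬(size ≤ (10:Int)) from by omega, show ¬(size ≤ (11:Int)) from by omega, show ¬(size ≤ (12:Int)) from by omega, show ¬(size ≤ (13:Int)) from by omega, show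 ¬(size ≤ (14:Int)) from by omega, show ¬(size ≤ (15:Int)) from by omega, show ¬(size ≤ (16:Int)) from by omega, show ¬(size ≤ (17:Int)) from by omega, show ¬(size ≤ (18:Int)) from by omega, show ¬(size ≤ (19:Int)) from by omega]
  · have h1 : 1 ≤ size := by omega
    have h2 : size ≤ 19 := by omega
    interval_cases size <;>
      (rw [pvRowsB.eq_def]; rw [pvRowsB.eq_def]; rw [pvRowsB.eq_def]; rw [pvRowsB.eq_def]; rw [pvRowsB.eq_def]) <;>
      norm_num [pvInnerA, show PySem.List.pyRange 0 4 1 = [0,1,2,3] from by decide,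
        show PySem.List.pyRange 0 5 1 = [0,1,2,3,4] from by decide,
        show PySem.List.pyRange 0 0 1 = [] from by decide,
        show PySem.List.pyRange 0 1 1 = [0] from by decide,
        show PySem.List.pyRange 0 2 1 = [0,1] from by decide,
        show PySem.List.pyRange 0 3 1 = [0,1,2] from by decide,
        min_def]
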